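-- pv_equiv track=rewrite | github.com/iDeFi-AI/api-v2 | api/turnqey/metrics.py | calculate_fraud_risk_summary
-- ===== SOURCE A (Python) =====
-- def calculate_fraud_risk_summary(interacting_wallets, flagged_addresses):
--     """
--     Summarize fraud risk by counting Low, Moderate, High-risk wallets and cross-reference flagged addresses.
--     """
--     risk_summary = {"Low": 0, "Moderate": 0, "High": 0, "Flagged": 0}
--     for wallet, count in interacting_wallets.items():
--         if wallet in flagged_addresses:
--             risk_summary["Flagged"] += 1
--         elif count > 100:
--             risk_summary["Low"] += 1
--         elif count > 20:
--             risk_summary["Moderate"] += 1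
--         else:
--             risk_summary["High"] += 1
--     return risk_summary
-- ===== SOURCE B (Python) =====
-- def calculate_fraud_risk_summary(interacting_wallets, flagged_addresses):
--     """Same summary, computed as four independent passes instead of one coordinated loop."""
--     flagged_set = set(flagged_addresses)
--     flagged = sum(1 for w in interacting_wallets if w in flagged_set)
--     low = sum(1 for w, c in interacting_wallets.items()
--               if w not in flagged_set and c > 100)
--     moderate = sum(1 for w, c in interacting_wallets.items()
--                    if w not in flagged_set and 20 < c <= 100)
--     high = sum(1 for w, c in interacting_wallets.items()
--                if w not in flagged_set and c <= 20)
--     return {"Low": low, "Moderate": moderate, "High": high, "Flagged": flagged}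
-- ===== Notes on version B (the rewrite author's own statement) =====
-- stated objective: faster
-- what changed: Replaces the single loop that mutates a four-key counter dict via an if/elif chain by four independent passes: a set of flagged addresses is built once, Flagged is a count of keys in that set, and Low/Moderate/High are separate generator-expression sums over the items with explicit disjoint range guards.
import Mathlib
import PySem

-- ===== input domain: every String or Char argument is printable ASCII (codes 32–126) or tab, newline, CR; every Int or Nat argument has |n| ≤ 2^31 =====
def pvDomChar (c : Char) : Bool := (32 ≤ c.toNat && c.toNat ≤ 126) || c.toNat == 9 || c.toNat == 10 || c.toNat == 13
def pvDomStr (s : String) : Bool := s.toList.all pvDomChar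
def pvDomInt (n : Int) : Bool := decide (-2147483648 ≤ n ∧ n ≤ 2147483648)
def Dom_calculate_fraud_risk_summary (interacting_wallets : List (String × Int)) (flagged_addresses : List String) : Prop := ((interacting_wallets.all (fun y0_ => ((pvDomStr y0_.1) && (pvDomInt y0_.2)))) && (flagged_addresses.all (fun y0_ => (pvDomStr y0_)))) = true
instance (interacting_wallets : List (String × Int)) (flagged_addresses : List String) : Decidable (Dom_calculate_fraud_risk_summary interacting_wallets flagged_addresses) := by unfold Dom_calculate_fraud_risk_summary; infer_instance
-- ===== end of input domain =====

-- B replaces A's single dict-mutating if/elif loop by four independent counting passes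
-- over the items, with a flagged set built once; equivalence of the return values is proved below.

-- ===== PORT A =====
-- one loop over the items, mutating a four-key dict via an if/elif chain
def calculate_fraud_risk_summary (interacting_wallets : List (String × Int)) (flagged_addresses : List String) : List (String × Int) :=
  let risk_summary : PySem.Dict String Int :=
    PySem.Dict.ofList [("Low", 0), ("Moderate", 0), ("High", 0), ("Flagged", 0)]
  let risk_summary := interacting_wallets.foldl (fun d wc =>
    if flagged_addresses.contains wc.1 then d.modify "Flagged" 0 (· + 1)
    else if wc.2 > 100 then d.modify "Low" 0 (· + 1)
    else if wc.2 > 20 then d.modify "Moderate" 0 (· + 1)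
    else d.modify "High" 0 (· + 1)) risk_summary
  risk_summary.items

-- ===== PORT B =====
-- four independent passes: flagged-set membership count, then three guarded range counts
def calculate_fraud_risk_summary_alt (interacting_wallets : List (String × Int)) (flagged_addresses : List String) : List (String × Int) :=
  let flagged_set : PySem.Set String := PySem.Set.ofList flagged_addresses
  let flagged : Int := (interacting_wallets.countP (fun wc => flagged_set.contains wc.1) : Int)
  let low : Int := (interacting_wallets.countP (fun wc => !flagged_set.contains wc.1 && wc.2 > 100) : Int)
  let moderate : Int := (interacting_wallets.countP (fun wc => !flagged_set.contains wc.1 && 20 < wc.2 && wc.2 ≤ 100) : Int)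
  let high : Int := (interacting_wallets.countP (fun wc => !flagged_set.contains wc.1 && wc.2 ≤ 20) : Int)
  [("Low", low), ("Moderate", moderate), ("High", high), ("Flagged", flagged)]

-- ===== PRECONDITION & SPEC =====
def Spec_calculate_fraud_risk_summary (interacting_wallets : List (String × Int)) (flagged_addresses : List String) (out : List (String × Int)) : Prop := out = calculate_fraud_risk_summary_alt interacting_wallets flagged_addresses
instance (interacting_wallets : List (String × Int)) (flagged_addresses : List String) (out : List (String × Int)) : Decidable (Spec_calculate_fraud_risk_summary interacting_wallets flagged_addresses out) := by unfold Spec_calculate_fraud_risk_summary; infer_instance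

-- ===== CLAIM (what is proved, stated in full; the proofs are below) =====
def Claim_equal_calculate_fraud_risk_summary : Prop := ∀ (interacting_wallets : List (String × Int)) (flagged_addresses : List String), Dom_calculate_fraud_risk_summary interacting_wallets flagged_addresses → Spec_calculate_fraud_risk_summary interacting_wallets flagged_addresses (calculate_fraud_risk_summary interacting_wallets flagged_addresses)

-- ===== LEMMAS AND PROOFS =====

theorem contains_ofList_eq (fl : List String) (x : String) :
    (PySem.Set.ofList fl).contains x = fl.contains x := by
  simp [List.contains_eq_mem, PySem.Set.contains, PySem.Set.mem_ofList]

def pvLit (a b c d : Int) : PySem.Dict String Int :=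
  PySem.Dict.ofList [("Low", a), ("Moderate", b), ("High", c), ("Flagged", d)]

theorem pvLit_items (a b c d : Int) :
    (pvLit a b c d).items = [("Low", a), ("Moderate", b), ("High", c), ("Flagged", d)] := rfl

theorem pvLit_flagged (a b c d : Int) :
    (pvLit a b c d).modify "Flagged" 0 (· + 1) = pvLit a b c (d + 1) := rfl
theorem pvLit_low (a b c d : Int) :
    (pvLit a b c d).modify "Low" 0 (· + 1) = pvLit (a + 1) b c d := rfl
theorem pvLit_moderate (a b c d : Int) :
    (pvLit a b c d).modify "Moderate" 0 (· + 1) = pvLit a (b + 1) c d := rfl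
theorem pvLit_high (a b c d : Int) :
    (pvLit a b c d).modify "High" 0 (· + 1) = pvLit a b (c + 1) d := rfl

-- loop invariant: folding A's step over any list, starting from the four-key literal dict,
-- adds the four B-style counts to the stored values
theorem foldl_items (l : List (String × Int)) (fl : List String) (a b c d : Int) :
    (l.foldl (fun d wc =>
      if fl.contains wc.1 then d.modify "Flagged" 0 (· + 1)
      else if wc.2 > 100 then d.modify "Low" 0 (· + 1)
      else if wc.2 > 20 then d.modify "Moderate" 0 (· + 1)
      else d.modify "High" 0 (· + 1)) (pvLit a b c d)).items
    = [("Low", a + (l.countP (fun wc => !fl.contains wc.1 && wc.2 > 100) : Int)),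
       ("Moderate", b + (l.countP (fun wc => !fl.contains wc.1 && 20 < wc.2 && wc.2 ≤ 100) : Int)),
       ("High", c + (l.countP (fun wc => !fl.contains wc.1 && wc.2 ≤ 20) : Int)),
       ("Flagged", d + (l.countP (fun wc => fl.contains wc.1) : Int))] := by
  induction l generalizing a b c d with
  | nil => simp [pvLit_items]
  | cons hd tl ih =>
    obtain ⟨w, cnt⟩ := hd
    simp only [List.foldl_cons, List.countP_cons]
    by_cases h1 : fl.contains w
    · have h1' : w ∈ fl := by simpa using h1
      rw [if_pos h1, pvLit_flagged, ih]
      simp [h1']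
      all_goals first | assumption | omega
    · have h1' : w ∉ fl := by simpa using h1
      by_cases h2 : cnt > 100
      · rw [if_neg h1, if_pos h2, pvLit_low, ih]
        simp [h1', h2]
        all_goals first | assumption | omega
      · by_cases h3 : cnt > 20
        · rw [if_neg h1, if_neg h2, if_pos h3, pvLit_moderate, ih]
          simp [h1', h2, h3, (by omega : cnt ≤ 100)]
          all_goals first | assumption | omega
        · rw [if_neg h1, if_neg h2, if_neg h3, pvLit_high, ih]
          simp [h1', h2, h3, (by omega : cnt ≤ 20)]
          all_goals first | assumption | omega

-- ===== VERDICT (by name: the statement is the Claim_ definition above) =====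
theorem calculate_fraud_risk_summary_spec : Claim_equal_calculate_fraud_risk_summary := by
  intro iw fl _
  unfold Spec_calculate_fraud_risk_summary calculate_fraud_risk_summary calculate_fraud_risk_summary_alt
  simp only [contains_ofList_eq]
  rw [show PySem.Dict.ofList [("Low", (0:Int)), ("Moderate", 0), ("High", 0), ("Flagged", 0)] = pvLit 0 0 0 0 from rfl]
  rw [foldl_items]
  norm_num
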